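-- pv_equiv track=rewrite | github.com/Gwellir/personal-kuudere | feed_parser.py | get_resolution_from_tags
-- ===== SOURCE A (Python) =====
-- CATCH_360 = ['360p']
--
-- CATCH_480 = ['480p', '720x480']
--
-- CATCH_720 = ['720p', '1280x720']
--
-- CATCH_1080 = ['1080p', '1920x1080']
--
-- def get_resolution_from_tags(tags):
--     """
--     Checks list for tags related to typical video resolutions and returns a corresponding number
--     :param tags: list of parsed tags
--     :rtype: int
--     """
--     resolution = None
--     if [res for res in CATCH_720 if res in [t.lower() for t in tags]]:
--         resolution = 720
--     elif [res for res in CATCH_1080 if res in [t.lower() for t in tags]]: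
--         resolution = 1080
--     elif [res for res in CATCH_480 if res in [t.lower() for t in tags]]\
--             or [res for res in CATCH_360 if res in [t.lower() for t in tags]]:
--         resolution = 480
--     return resolution
-- ===== SOURCE B (Python) =====
-- _RES_BY_TAG = {
--     '720p': 720, '1280x720': 720,
--     '1080p': 1080, '1920x1080': 1080,
--     '480p': 480, '720x480': 480,
--     '360p': 480,
-- }
--
-- _PRIORITY = (720, 1080, 480)
--
--
-- def get_resolution_from_tags(tags):
--     """
--     Checks list for tags related to typical video resolutions and returns a corresponding number
--     :param tags: list of parsed tags
--     :rtype: int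
--     """
--     found = set()
--     for t in tags:
--         res = _RES_BY_TAG.get(t.lower())
--         if res is not None:
--             found.add(res)
--     return next((r for r in _PRIORITY if r in found), None)
-- ===== Notes on version B (the rewrite author's own statement) =====
-- stated objective: faster
-- what changed: Replaces A's per-resolution nested list scans (each rebuilding the lowered tag list) with a constant inverted tag->resolution dict, one pass over tags collecting the set of resolutions found, and a priority scan (720, 1080, 480) for the result.
import Mathlib
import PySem

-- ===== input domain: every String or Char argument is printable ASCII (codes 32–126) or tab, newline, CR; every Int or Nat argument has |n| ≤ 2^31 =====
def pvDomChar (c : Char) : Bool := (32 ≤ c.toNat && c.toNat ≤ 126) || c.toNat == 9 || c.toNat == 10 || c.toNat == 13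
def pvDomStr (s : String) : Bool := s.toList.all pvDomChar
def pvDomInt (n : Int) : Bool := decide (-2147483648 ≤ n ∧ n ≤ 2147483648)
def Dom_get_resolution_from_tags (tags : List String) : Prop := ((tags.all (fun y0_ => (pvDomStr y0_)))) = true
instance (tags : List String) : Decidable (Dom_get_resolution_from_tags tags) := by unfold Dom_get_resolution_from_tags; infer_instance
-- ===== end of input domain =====

-- B replaces A's per-resolution rescans of the re-lowered tag list with a constant inverted tag→resolution dict, one pass collecting the set of resolutions found, and a fixed 720,1080,480 priority scan (measured faster; same return value, proved equal).


-- ===== PORT A =====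
def CATCH_360 : List String := ["360p"]
def CATCH_480 : List String := ["480p", "720x480"]
def CATCH_720 : List String := ["720p", "1280x720"]
def CATCH_1080 : List String := ["1080p", "1920x1080"]

def get_resolution_from_tags (tags : List String) : Option Int :=
  if (CATCH_720.filter (fun res => (tags.map PySem.Str.lower).contains res)) ≠ [] then some 720
  else if (CATCH_1080.filter (fun res => (tags.map PySem.Str.lower).contains res)) ≠ [] then some 1080
  else if (CATCH_480.filter (fun res => (tags.map PySem.Str.lower).contains res)) ≠ []
          ∨ (CATCH_360.filter (fun res => (tags.map PySem.Str.lower).contains res)) ≠ [] then some 480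
  else none

-- ===== PORT B =====
def resByTag : PySem.Dict String Int :=
  PySem.Dict.ofList [("720p", 720), ("1280x720", 720), ("1080p", 1080), ("1920x1080", 1080),
                     ("480p", 480), ("720x480", 480), ("360p", 480)]

def resPriority : List Int := [720, 1080, 480]

-- the one-pass loop of Source B: collect the set of resolutions whose tag occurs (lowercased)
def foundResolutions (tags : List String) : PySem.Set Int :=
  tags.foldl (fun s t =>
    match PySem.Dict.get? resByTag (PySem.Str.lower t) with
    | some r => PySem.Set.add s r
    | none => s) PySem.Set.empty

def get_resolution_from_tags_alt (tags : List String) : Option Int :=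
  resPriority.find? (fun r => PySem.Set.contains (foundResolutions tags) r)

-- ===== PRECONDITION & SPEC =====
def Spec_get_resolution_from_tags (tags : List String) (out : Option Int) : Prop := out = get_resolution_from_tags_alt tags
instance (tags : List String) (out : Option Int) : Decidable (Spec_get_resolution_from_tags tags out) := by unfold Spec_get_resolution_from_tags; infer_instance

-- ===== CLAIM (what is proved, stated in full; the proofs are below) =====
def Claim_equal_get_resolution_from_tags : Prop := ∀ (tags : List String), Dom_get_resolution_from_tags tags → Spec_get_resolution_from_tags tags (get_resolution_from_tags tags)

-- ===== LEMMAS AND PROOFS =====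

theorem resByTag_mk : resByTag = PySem.Dict.mk [("720p", 720), ("1280x720", 720), ("1080p", 1080),
    ("1920x1080", 1080), ("480p", 480), ("720x480", 480), ("360p", 480)] := by decide

-- membership in the B-side loop's accumulated set
theorem mem_foundResolutions_aux (tags : List String) (acc : PySem.Set Int) (r : Int) :
    r ∈ tags.foldl (fun s t =>
      match PySem.Dict.get? resByTag (PySem.Str.lower t) with
      | some r => PySem.Set.add s r
      | none => s) acc ↔
    r ∈ acc ∨ ∃ t ∈ tags, PySem.Dict.get? resByTag (PySem.Str.lower t) = some r := by
  induction tags generalizing acc with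
  | nil => simp
  | cons t ts ih =>
    simp only [List.foldl_cons]
    cases h : PySem.Dict.get? resByTag (PySem.Str.lower t) with
    | none =>
      rw [ih]
      constructor
      · rintro (hr | ⟨u, hu, he⟩)
        · exact Or.inl hr
        · exact Or.inr ⟨u, List.mem_cons_of_mem _ hu, he⟩
      · rintro (hr | ⟨u, hu, he⟩)
        · exact Or.inl hr
        · rcases List.mem_cons.mp hu with rfl | hu'
          · rw [h] at he; cases he
          · exact Or.inr ⟨u, hu', he⟩
    | some v =>
      rw [ih]
      constructor
      · rintro (hr | ⟨u, hu, he⟩)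
        · rcases (PySem.Set.mem_add _ _ _).mp hr with hr' | rfl
          · exact Or.inl hr'
          · exact Or.inr ⟨t, List.mem_cons_self .., h⟩
        · exact Or.inr ⟨u, List.mem_cons_of_mem _ hu, he⟩
      · rintro (hr | ⟨u, hu, he⟩)
        · exact Or.inl ((PySem.Set.mem_add _ _ _).mpr (Or.inl hr))
        · rcases List.mem_cons.mp hu with rfl | hu'
          · rw [h] at he
            exact Or.inl ((PySem.Set.mem_add _ _ _).mpr (Or.inr (Option.some.inj he).symm))
          · exact Or.inr ⟨u, hu', he⟩

theorem mem_foundResolutions (tags : List String) (r : Int) :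
    r ∈ foundResolutions tags ↔ ∃ t ∈ tags, PySem.Dict.get? resByTag (PySem.Str.lower t) = some r := by
  unfold foundResolutions
  rw [mem_foundResolutions_aux]
  simp [PySem.Set.empty]

-- the inverted dict, characterised per resolution
theorem lookup_720 (k : String) : PySem.Dict.get? resByTag k = some 720 ↔ k ∈ CATCH_720 := by
  by_cases hk : k ∈ ["720p", "1280x720", "1080p", "1920x1080", "480p", "720x480", "360p"]
  · simp only [List.mem_cons, List.not_mem_nil, or_false] at hk
    rcases hk with rfl | rfl | rfl | rfl | rfl | rfl | rfl <;> decide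
  · have hnone : PySem.Dict.get? resByTag k = none := by
      rw [PySem.Dict.get?_eq_none_iff_not_mem_keys]
      simpa [resByTag_mk] using hk
    simp only [List.mem_cons, List.not_mem_nil, or_false] at hk
    push Not at hk
    simp [hnone, CATCH_720, hk.1, hk.2.1]

theorem lookup_1080 (k : String) : PySem.Dict.get? resByTag k = some 1080 ↔ k ∈ CATCH_1080 := by
  by_cases hk : k ∈ ["720p", "1280x720", "1080p", "1920x1080", "480p", "720x480", "360p"]
  · simp only [List.mem_cons, List.not_mem_nil, or_false] at hk
    rcases hk with rfl | rfl | rfl | rfl | rfl | rfl | rfl <;> decide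
  · have hnone : PySem.Dict.get? resByTag k = none := by
      rw [PySem.Dict.get?_eq_none_iff_not_mem_keys]
      simpa [resByTag_mk] using hk
    simp only [List.mem_cons, List.not_mem_nil, or_false] at hk
    push Not at hk
    simp [hnone, CATCH_1080, hk.2.2.1, hk.2.2.2.1]

theorem lookup_480 (k : String) : PySem.Dict.get? resByTag k = some 480 ↔ (k ∈ CATCH_480 ∨ k ∈ CATCH_360) := by
  by_cases hk : k ∈ ["720p", "1280x720", "1080p", "1920x1080", "480p", "720x480", "360p"]
  · simp only [List.mem_cons, List.not_mem_nil, or_false] at hk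
    rcases hk with rfl | rfl | rfl | rfl | rfl | rfl | rfl <;> decide
  · have hnone : PySem.Dict.get? resByTag k = none := by
      rw [PySem.Dict.get?_eq_none_iff_not_mem_keys]
      simpa [resByTag_mk] using hk
    simp only [List.mem_cons, List.not_mem_nil, or_false] at hk
    push Not at hk
    simp [hnone, CATCH_480, CATCH_360, hk.2.2.2.2]

-- A's per-list scan condition, as an existential over tags
theorem filter_ne_nil_iff (catch_ : List String) (tags : List String) :
    (catch_.filter (fun res => (tags.map PySem.Str.lower).contains res)) ≠ [] ↔
    ∃ res ∈ catch_, ∃ t ∈ tags, PySem.Str.lower t = res := by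
  rw [Ne, List.filter_eq_nil_iff]
  push Not
  simp [List.mem_map, eq_comm]

-- ===== VERDICT (by name: the statement is the Claim_ definition above) =====
theorem get_resolution_from_tags_spec : Claim_equal_get_resolution_from_tags := by
  intro tags _
  unfold Spec_get_resolution_from_tags get_resolution_from_tags get_resolution_from_tags_alt
  have c720 : ((CATCH_720.filter (fun res => (tags.map PySem.Str.lower).contains res)) ≠ []) ↔
      720 ∈ foundResolutions tags := by
    rw [filter_ne_nil_iff, mem_foundResolutions]
    constructor
    · rintro ⟨res, hres, t, ht, hlow⟩
      exact ⟨t, ht, (lookup_720 _).mpr (hlow ▸ hres)⟩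
    · rintro ⟨t, ht, hget⟩
      exact ⟨PySem.Str.lower t, (lookup_720 _).mp hget, t, ht, rfl⟩
  have c1080 : ((CATCH_1080.filter (fun res => (tags.map PySem.Str.lower).contains res)) ≠ []) ↔
      1080 ∈ foundResolutions tags := by
    rw [filter_ne_nil_iff, mem_foundResolutions]
    constructor
    · rintro ⟨res, hres, t, ht, hlow⟩
      exact ⟨t, ht, (lookup_1080 _).mpr (hlow ▸ hres)⟩
    · rintro ⟨t, ht, hget⟩
      exact ⟨PySem.Str.lower t, (lookup_1080 _).mp hget, t, ht, rfl⟩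
  have c480 : (((CATCH_480.filter (fun res => (tags.map PySem.Str.lower).contains res)) ≠ []) ∨
      ((CATCH_360.filter (fun res => (tags.map PySem.Str.lower).contains res)) ≠ [])) ↔
      480 ∈ foundResolutions tags := by
    rw [filter_ne_nil_iff, filter_ne_nil_iff, mem_foundResolutions]
    constructor
    · rintro (⟨res, hres, t, ht, hlow⟩ | ⟨res, hres, t, ht, hlow⟩)
      · exact ⟨t, ht, (lookup_480 _).mpr (Or.inl (hlow ▸ hres))⟩
      · exact ⟨t, ht, (lookup_480 _).mpr (Or.inr (hlow ▸ hres))⟩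
    · rintro ⟨t, ht, hget⟩
      rcases (lookup_480 _).mp hget with h | h
      · exact Or.inl ⟨PySem.Str.lower t, h, t, ht, rfl⟩
      · exact Or.inr ⟨PySem.Str.lower t, h, t, ht, rfl⟩
  split_ifs with h1 h2 h3
  · have m : 720 ∈ foundResolutions tags := c720.mp h1
    simp [resPriority, m]
  · have n720 : 720 ∉ foundResolutions tags := fun hm => h1 (c720.mpr hm)
    have m : 1080 ∈ foundResolutions tags := c1080.mp h2
    simp [resPriority, List.find?, n720, m]
  · have n720 : 720 ∉ foundResolutions tags := fun hm => h1 (c720.mpr hm)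
    have n1080 : 1080 ∉ foundResolutions tags := fun hm => h2 (c1080.mpr hm)
    have m : 480 ∈ foundResolutions tags := c480.mp h3
    simp [resPriority, List.find?, n720, n1080, m]
  · have n720 : 720 ∉ foundResolutions tags := fun hm => h1 (c720.mpr hm)
    have n1080 : 1080 ∉ foundResolutions tags := fun hm => h2 (c1080.mpr hm)
    have n480 : 480 ∉ foundResolutions tags := fun hm => h3 (c480.mpr hm)
    simp [resPriority, List.find?, n720, n1080, n480]
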